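-- pv_equiv track=rewrite | github.com/Doomsk/tph_lang | tph_lang/core/parser.py | get_linecol
-- ===== SOURCE A (Python) =====
-- def get_linecol(code):
--     line = 1
--     col = 1
--     tokens = []
--     for k in code:
--         if k == " ":
--             col += 1
--         elif k == "\n":
--             line += 1
--             col = 1
--         else:
--             tokens.append((k, line, col))
--             col += 1
--     return tokens
-- ===== SOURCE B (Python) =====
-- def get_linecol(code):
--     tokens = []
--     for line_no, line in enumerate(code.split("\n"), 1):
--         for col, ch in enumerate(line, 1):
--             if ch != " ":
--                 tokens.append((ch, line_no, col))
--     return tokens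
-- ===== Notes on version B (the rewrite author's own statement) =====
-- stated objective: alternative
-- what changed: Replaces the single flat character loop with a manual line counter and a newline branch by pre-splitting the code on newlines and using two nested enumerate loops, which yield line and column numbers for free.
import Mathlib
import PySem

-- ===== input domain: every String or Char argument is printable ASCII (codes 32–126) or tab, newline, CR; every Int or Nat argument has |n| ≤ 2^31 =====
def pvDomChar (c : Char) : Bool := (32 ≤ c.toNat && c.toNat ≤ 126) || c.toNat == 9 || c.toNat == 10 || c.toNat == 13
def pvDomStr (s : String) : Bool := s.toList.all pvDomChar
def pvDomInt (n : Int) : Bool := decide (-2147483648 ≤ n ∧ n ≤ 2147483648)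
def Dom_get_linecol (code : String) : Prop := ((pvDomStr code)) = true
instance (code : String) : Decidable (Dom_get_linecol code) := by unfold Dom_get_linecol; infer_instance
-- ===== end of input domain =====

-- B replaces A's flat character loop (manual line/col counters, newline branch) by
-- splitting on "\n" and two nested enumerate loops; same cost, different decomposition.


-- ===== PORT A =====
-- the for-loop over the string's characters, state (line, col, tokens)
def getLCAux : List Char → Int → Int → List (String × Int × Int) → List (String × Int × Int)
  | [], _, _, toks => toks
  | k :: rest, line, col, toks =>
    if k = ' ' then getLCAux rest line (col + 1) toks
    else if k = '\n' then getLCAux rest (line + 1) 1 toks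
    else getLCAux rest line (col + 1) (toks ++ [(String.singleton k, line, col)])

def get_linecol (code : String) : List (String × Int × Int) :=
  getLCAux code.toList 1 1 []

-- ===== PORT B =====
-- code.split("\n"), then nested enumerate loops (line numbers and columns from enumerate)
def get_linecol_alt (code : String) : List (String × Int × Int) :=
  (PySem.List.enumerate (PySem.Chars.splitOn code.toList ['\n']) 1).foldl
    (fun toks p =>
      (PySem.List.enumerate p.2 1).foldl
        (fun toks q =>
          if q.2 ≠ ' ' then toks ++ [(String.singleton q.2, p.1, q.1)] else toks)
        toks)
    []

-- ===== PRECONDITION & SPEC =====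
def Spec_get_linecol (code : String) (out : List (String × Int × Int)) : Prop := out = get_linecol_alt code
instance (code : String) (out : List (String × Int × Int)) : Decidable (Spec_get_linecol code out) := by unfold Spec_get_linecol; infer_instance

-- ===== CLAIM (what is proved, stated in full; the proofs are below) =====
def Claim_equal_get_linecol : Prop := ∀ (code : String), Dom_get_linecol code → Spec_get_linecol code (get_linecol code)

-- ===== LEMMAS AND PROOFS =====

-- the list of lines of cs (split at '\n'), simple structural form
def pvLines : List Char → List (List Char)
  | [] => [[]]
  | c :: cs => if c = '\n' then [] :: pvLines cs else (pvLines cs).modifyHead (c :: ·)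

-- tokens of a single line, columns counted from col
def pvRowAt (ln col : Int) : List Char → List (String × Int × Int)
  | [] => []
  | c :: cs =>
    if c = ' ' then pvRowAt ln (col + 1) cs
    else (String.singleton c, ln, col) :: pvRowAt ln (col + 1) cs

-- tokens of a list of lines, line numbers counted from ln, columns from 1
def pvAllRows (ln : Int) : List (List Char) → List (String × Int × Int)
  | [] => []
  | r :: rs => pvRowAt ln 1 r ++ pvAllRows (ln + 1) rs

-- A's loop without the accumulator
def pvTok : List Char → Int → Int → List (String × Int × Int)
  | [], _, _ => []
  | k :: rest, line, col =>
    if k = ' ' then pvTok rest line (col + 1)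
    else if k = '\n' then pvTok rest (line + 1) 1
    else (String.singleton k, line, col) :: pvTok rest line (col + 1)

theorem pvLines_ne_nil (cs : List Char) : pvLines cs ≠ [] := by
  cases cs with
  | nil => simp [pvLines]
  | cons c cs =>
    simp only [pvLines]
    split
    · simp
    · cases h : pvLines cs with
      | nil => exact absurd h (pvLines_ne_nil cs)
      | cons a t => simp

theorem getLCAux_eq_append (cs : List Char) :
    ∀ (line col : Int) (toks : List (String × Int × Int)),
      getLCAux cs line col toks = toks ++ pvTok cs line col := by
  induction cs with
  | nil => intro line col toks; simp [getLCAux, pvTok]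
  | cons k rest ih =>
    intro line col toks
    simp only [getLCAux, pvTok]
    split
    · simp [ih]
    · split
      · simp [ih]
      · rw [ih]; simp

theorem splitOn_go_spec (f : Nat) :
    ∀ (s cur : List Char) (acc : List (List Char)), s.length < f →
      PySem.Chars.splitOn.go ['\n'] f s cur acc =
        acc.reverse ++ (pvLines s).modifyHead (cur.reverse ++ ·) := by
  induction f with
  | zero => intro s cur acc h; omega
  | succ f ih =>
    intro s cur acc h
    cases s with
    | nil => simp [PySem.Chars.splitOn.go, pvLines]
    | cons c cs =>
      simp only [PySem.Chars.splitOn.go, List.isPrefixOf, Bool.and_true,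
        List.length_cons, List.length_nil,
        List.drop_succ_cons, List.drop_zero]
      by_cases hc : c = '\n'
      · subst hc
        rw [if_pos (by simp)]
        rw [ih cs [] ((cur.reverse) :: acc) (by simp at h ⊢; omega)]
        cases hl : pvLines cs with
        | nil => exact absurd hl (pvLines_ne_nil cs)
        | cons a t => simp [pvLines, hl]
      · rw [if_neg (fun hh => hc (beq_iff_eq.mp hh).symm)]
        rw [ih cs (c :: cur) acc (by simp at h ⊢; omega)]
        simp only [pvLines, if_neg hc]
        cases hl : pvLines cs with
        | nil => exact absurd hl (pvLines_ne_nil cs)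
        | cons a t => simp

theorem splitOn_eq_pvLines (cs : List Char) :
    PySem.Chars.splitOn cs ['\n'] = pvLines cs := by
  have h := splitOn_go_spec (cs.length + 1) cs [] [] (by omega)
  simp only [PySem.Chars.splitOn]
  rw [h]
  cases hl : pvLines cs with
  | nil => exact absurd hl (pvLines_ne_nil cs)
  | cons a t => simp

theorem pvTok_eq (cs : List Char) :
    ∀ (line col : Int),
      pvTok cs line col =
        match pvLines cs with
        | [] => []
        | r :: rs => pvRowAt line col r ++ pvAllRows (line + 1) rs := by
  induction cs with
  | nil => intro line col; simp [pvTok, pvLines, pvRowAt, pvAllRows]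
  | cons k rest ih =>
    intro line col
    simp only [pvTok, pvLines]
    by_cases hs : k = ' '
    · rw [if_pos hs, if_neg (by rw [hs]; decide), ih]
      cases hl : pvLines rest with
      | nil => exact absurd hl (pvLines_ne_nil rest)
      | cons a t => simp [pvRowAt, hs]
    · rw [if_neg hs]
      by_cases hn : k = '\n'
      · rw [if_pos hn, if_pos hn, ih]
        cases hl : pvLines rest with
        | nil => exact absurd hl (pvLines_ne_nil rest)
        | cons a t => simp [pvAllRows, pvRowAt]
      · rw [if_neg hn, if_neg hn, ih]
        cases hl : pvLines rest with
        | nil => exact absurd hl (pvLines_ne_nil rest)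
        | cons a t => simp [pvRowAt, hs]

theorem inner_foldl_eq (row : List Char) :
    ∀ (ln col : Int) (toks : List (String × Int × Int)),
      (PySem.List.enumerate row col).foldl
        (fun toks q =>
          if q.2 ≠ ' ' then toks ++ [(String.singleton q.2, ln, q.1)] else toks)
        toks = toks ++ pvRowAt ln col row := by
  induction row with
  | nil => intro ln col toks; simp [PySem.List.enumerate_nil, pvRowAt]
  | cons c cs ih =>
    intro ln col toks
    rw [PySem.List.enumerate_cons, List.foldl_cons]
    by_cases hs : c = ' '
    · have hstep : (if ((col, c) : Int × Char).2 ≠ ' ' then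
            toks ++ [(String.singleton ((col, c) : Int × Char).2, ln, ((col, c) : Int × Char).1)]
          else toks) = toks := by simp [hs]
      rw [hstep, ih]
      simp [pvRowAt, hs]
    · have hstep : (if ((col, c) : Int × Char).2 ≠ ' ' then
            toks ++ [(String.singleton ((col, c) : Int × Char).2, ln, ((col, c) : Int × Char).1)]
          else toks) = toks ++ [(String.singleton c, ln, col)] := by simp [hs]
      rw [hstep, ih]
      simp [pvRowAt, hs]

theorem outer_foldl_eq (rows : List (List Char)) :
    ∀ (ln : Int) (toks : List (String × Int × Int)),
      (PySem.List.enumerate rows ln).foldl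
        (fun toks p =>
          (PySem.List.enumerate p.2 1).foldl
            (fun toks q =>
              if q.2 ≠ ' ' then toks ++ [(String.singleton q.2, p.1, q.1)] else toks)
            toks)
        toks = toks ++ pvAllRows ln rows := by
  induction rows with
  | nil => intro ln toks; simp [PySem.List.enumerate_nil, pvAllRows]
  | cons r rs ih =>
    intro ln toks
    rw [PySem.List.enumerate_cons]
    simp only [List.foldl_cons]
    rw [inner_foldl_eq, ih]
    simp [pvAllRows]

-- ===== VERDICT (by name: the statement is the Claim_ definition above) =====
theorem get_linecol_spec : Claim_equal_get_linecol := by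
  intro code _
  unfold Spec_get_linecol get_linecol get_linecol_alt
  rw [getLCAux_eq_append, splitOn_eq_pvLines, outer_foldl_eq, pvTok_eq]
  cases hl : pvLines code.toList with
  | nil => exact absurd hl (pvLines_ne_nil code.toList)
  | cons r rs => simp [pvAllRows]
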